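-- pv_equiv track=rewrite | github.com/LEE-DA-EUN/Auto_CT | 프로그래머스/1/389478. 택배 상자 꺼내기/택배 상자 꺼내기.py | solution
-- ===== SOURCE A (Python) =====
-- def solution(n, w, num):
--     answer = 0
--     idx = num-1
--     floor = idx//w
--     col = 0
--     if floor%2 == 0:
--         col = idx%w
--     else:
--         col = w-1-(idx%w)
--
--     for i in range(n):
--         now_floor = i//w
--         if now_floor%2 == 0:
--             now_col = i%w
--         else:
--             now_col = w-1-(i%w)
--         if now_col == col and now_floor >= floor:
--             answer += 1
--
--     return answer
-- ===== SOURCE B (Python) =====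
-- def solution(n, w, num):
--     # Closed-form arithmetic: no loop at all, O(1).
--     idx = num - 1
--     floor0 = idx // w
--     col = idx % w if floor0 % 2 == 0 else w - 1 - idx % w
--     top = (n - 1) // w
--     start = max(floor0, 0)
--     full = max(top - start, 0)
--     r = col if top % 2 == 0 else w - 1 - col
--     extra = 1 if (start <= top and top * w + r < n) else 0
--     return full + extra
-- ===== Notes on version B (the rewrite author's own statement) =====
-- stated objective: faster
-- what changed: Instead of scanning all n boxes and testing each one's column and floor, B computes the answer in closed form: the number of full floors above the target's floor plus one arithmetic test for the partially filled top floor.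
-- outside the precondition, e.g. on solution(5, -2, 3): A returns 1, B returns 0; on solution(4, 0, 2): A raises ZeroDivisionError, B raises ZeroDivisionError
import Mathlib
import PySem

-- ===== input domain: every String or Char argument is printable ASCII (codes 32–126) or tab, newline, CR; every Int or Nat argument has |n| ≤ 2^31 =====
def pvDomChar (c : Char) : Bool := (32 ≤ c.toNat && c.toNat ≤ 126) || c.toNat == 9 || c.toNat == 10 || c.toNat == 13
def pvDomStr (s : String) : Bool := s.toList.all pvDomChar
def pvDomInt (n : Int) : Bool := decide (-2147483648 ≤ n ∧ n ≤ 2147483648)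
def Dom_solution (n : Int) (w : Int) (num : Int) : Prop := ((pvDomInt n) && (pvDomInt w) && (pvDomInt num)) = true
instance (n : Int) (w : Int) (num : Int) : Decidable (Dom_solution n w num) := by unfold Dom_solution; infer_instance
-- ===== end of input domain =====

-- B replaces A's scan over all n boxes by closed-form arithmetic (no loop); equal return values proved for w ≥ 1.

-- ===== PORT A =====
def solution (n : Int) (w : Int) (num : Int) : Int :=
  let idx := num - 1
  let floor := PySem.Int.floordiv idx w
  let col := if PySem.Int.mod floor 2 = 0 then PySem.Int.mod idx w else w - 1 - PySem.Int.mod idx w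
  (PySem.List.pyRange 0 n 1).foldl
    (fun answer i =>
      let nowFloor := PySem.Int.floordiv i w
      let nowCol := if PySem.Int.mod nowFloor 2 = 0 then PySem.Int.mod i w else w - 1 - PySem.Int.mod i w
      if nowCol = col ∧ floor ≤ nowFloor then answer + 1 else answer)
    0

-- ===== PORT B =====
def solution_alt (n : Int) (w : Int) (num : Int) : Int :=
  let idx := num - 1
  let floor0 := PySem.Int.floordiv idx w
  let col := if PySem.Int.mod floor0 2 = 0 then PySem.Int.mod idx w else w - 1 - PySem.Int.mod idx w
  let top := PySem.Int.floordiv (n - 1) w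
  let start := max floor0 0
  let full := max (top - start) 0
  let r := if PySem.Int.mod top 2 = 0 then col else w - 1 - col
  let extra := if start ≤ top ∧ top * w + r < n then (1 : Int) else 0
  full + extra

-- ===== PRECONDITION & SPEC =====
-- Pre_ excludes w ≤ 0: w = 0 makes A raise ZeroDivisionError, and a negative shelf width is
-- outside the puzzle's natural domain (there A's arithmetic over negative residues is an accident).
def Pre_solution (n : Int) (w : Int) (num : Int) : Prop := 1 ≤ w
instance (n : Int) (w : Int) (num : Int) : Decidable (Pre_solution n w num) := by unfold Pre_solution; infer_instance
def pvWitness_solution : Int × Int × Int := (13, 3, 5)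

def Spec_solution (n : Int) (w : Int) (num : Int) (out : Int) : Prop := out = solution_alt n w num
instance (n : Int) (w : Int) (num : Int) (out : Int) : Decidable (Spec_solution n w num out) := by unfold Spec_solution; infer_instance

-- ===== CLAIM (what is proved, stated in full; the proofs are below) =====
def Claim_equal_solution : Prop := ∀ (n : Int) (w : Int) (num : Int), Dom_solution n w num → Pre_solution n w num → Spec_solution n w num (solution n w num)

-- ===== LEMMAS AND PROOFS =====

theorem pv_foldl_if_countP (C : Int → Prop) [DecidablePred C] (l : List Int) :
  l.foldl (fun a i => if C i then a+1 else a) (0:Int) = (l.countP (fun i => decide (C i)) : Int) := by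
  have h := PySem.List.foldl_count_if (fun i => decide (C i)) l 0
  simp only [decide_eq_true_eq] at h
  simpa using h

theorem pv_countP_card (C : Int → Prop) [DecidablePred C] (a b : Int) :
  ((PySem.List.pyRange a b 1).countP (fun i => decide (C i))) = ((Finset.Ico a b).filter C).card := by
  rw [List.countP_eq_length_filter]
  have nd2 := (PySem.List.nodup_pyRange_one a b).filter (fun i => decide (C i))
  rw [← List.toFinset_card_of_nodup nd2, List.toFinset_filter]
  congr 1
  ext x
  simp [PySem.List.mem_pyRange_one]

-- A's box count equals the count of occupied floors of the target column.
theorem pv_main (n w num : Int) (hw : 1 ≤ w) :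
    let idx := num - 1
    let fl := PySem.Int.floordiv idx w
    let col := if PySem.Int.mod fl 2 = 0 then PySem.Int.mod idx w else w - 1 - PySem.Int.mod idx w
    let top := PySem.Int.floordiv (n - 1) w
    ((Finset.Ico (0:Int) n).filter (fun i =>
        ((if PySem.Int.mod (PySem.Int.floordiv i w) 2 = 0 then PySem.Int.mod i w
          else w - 1 - PySem.Int.mod i w) = col ∧ fl ≤ PySem.Int.floordiv i w))).card
  = ((Finset.Ico (max fl 0) (top+1)).filter (fun f =>
        f * w + (if PySem.Int.mod f 2 = 0 then col else w - 1 - col) < n)).card := by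
  intro idx fl col top
  have hw0 : (0:Int) < w := hw
  have hm0 : 0 ≤ PySem.Int.mod idx w := PySem.Int.mod_nonneg idx hw0
  have hmw : PySem.Int.mod idx w < w := PySem.Int.mod_lt idx hw0
  have hcol0 : 0 ≤ col := by unfold col; split <;> omega
  have hcolw : col < w := by unfold col; split <;> omega
  set r : Int → Int := fun f => if PySem.Int.mod f 2 = 0 then col else w - 1 - col with hr
  have hr0 : ∀ f, 0 ≤ r f := by intro f; simp only [hr]; split <;> omega
  have hrw : ∀ f, r f < w := by intro f; simp only [hr]; split <;> omega
  apply Finset.card_bij (fun i _ => PySem.Int.floordiv i w)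
  · intro i hi
    simp only [Finset.mem_filter, Finset.mem_Ico] at hi ⊢
    obtain ⟨⟨hi0, hin⟩, hcoli, hfli⟩ := hi
    have him0 : 0 ≤ PySem.Int.mod i w := PySem.Int.mod_nonneg i hw0
    have himw : PySem.Int.mod i w < w := PySem.Int.mod_lt i hw0
    have hdm := PySem.Int.floordiv_mul_add_mod i w
    have hf0 : 0 ≤ PySem.Int.floordiv i w :=
      (PySem.Int.le_floordiv_iff_mul_le hw0).mpr (by omega)
    have hftop : PySem.Int.floordiv i w ≤ top := by
      rw [PySem.Int.le_floordiv_iff_mul_le hw0]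
      have := PySem.Int.floordiv_mul_add_mod (n-1) w
      have := PySem.Int.mod_nonneg (n-1) hw0
      have := PySem.Int.mod_lt (n-1) hw0
      nlinarith [PySem.Int.floordiv_mul_add_mod i w]
    refine ⟨⟨max_le_iff.mpr ⟨hfli, hf0⟩, by omega⟩, ?_⟩
    have hrfi : PySem.Int.floordiv i w * w + r (PySem.Int.floordiv i w) = i := by
      simp only [hr]
      by_cases hpar : PySem.Int.mod (PySem.Int.floordiv i w) 2 = 0
      · rw [if_pos hpar]; rw [if_pos hpar] at hcoli; omega
      · rw [if_neg hpar]; rw [if_neg hpar] at hcoli; omega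
    omega
  · intro i hi j hj hij
    simp only [Finset.mem_filter, Finset.mem_Ico] at hi hj
    have hdi := PySem.Int.floordiv_mul_add_mod i w
    have hdj := PySem.Int.floordiv_mul_add_mod j w
    have : PySem.Int.mod i w = PySem.Int.mod j w := by
      rcases hi with ⟨_, hcoli, _⟩; rcases hj with ⟨_, hcolj, _⟩
      rw [hij] at hcoli
      by_cases hpar : PySem.Int.mod (PySem.Int.floordiv j w) 2 = 0
      · rw [if_pos hpar] at hcoli hcolj; omega
      · rw [if_neg hpar] at hcoli hcolj; omega
    rw [hij] at hdi
    omega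
  · intro f hf
    simp only [Finset.mem_filter, Finset.mem_Ico] at hf
    obtain ⟨⟨hflo, hftop⟩, hfn⟩ := hf
    have hf0 : 0 ≤ f := le_trans (le_max_right _ _) hflo
    have hfl : fl ≤ f := le_trans (le_max_left _ _) hflo
    have hi0 : 0 ≤ f * w + r f := by nlinarith [hr0 f]
    have hfd : PySem.Int.floordiv (f * w + r f) w = f := by
      rw [PySem.Int.floordiv_eq_iff_of_pos hw0]
      constructor
      · nlinarith [hr0 f]
      · nlinarith [hrw f]
    refine ⟨f * w + r f, ?_, hfd⟩
    simp only [Finset.mem_filter, Finset.mem_Ico]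
    refine ⟨⟨hi0, hfn⟩, ?_, by rw [hfd]; exact hfl⟩
    have hmod : PySem.Int.mod (f * w + r f) w = r f := by
      have := PySem.Int.floordiv_mul_add_mod (f * w + r f) w
      rw [hfd] at this; omega
    rw [hfd, hmod]
    simp only [hr]
    split <;> omega

-- The count of occupied floors of the target column equals B's closed form.
theorem pv_floors_closed (n w col start top : Int) (hw : 1 ≤ w) (hcol0 : 0 ≤ col) (hcolw : col < w)
    (htw : top * w ≤ n - 1) :
    (((Finset.Ico start (top+1)).filter (fun f =>
        f * w + (if PySem.Int.mod f 2 = 0 then col else w - 1 - col) < n)).card : Int)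
  = max (top - start) 0
    + (if start ≤ top ∧ top * w + (if PySem.Int.mod top 2 = 0 then col else w - 1 - col) < n
       then (1:Int) else 0) := by
  by_cases hst : start ≤ top
  · -- Ico start (top+1) = insert top (Ico start top); every floor below top is full.
    have hins : Finset.Ico start (top+1) = insert top (Finset.Ico start top) := by
      ext x; simp only [Finset.mem_Ico, Finset.mem_insert]; omega
    rw [hins, Finset.filter_insert]
    have hfull : (Finset.Ico start top).filter (fun f =>
        f * w + (if PySem.Int.mod f 2 = 0 then col else w - 1 - col) < n)
        = Finset.Ico start top := by
      apply Finset.filter_true_of_mem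
      intro f hf
      simp only [Finset.mem_Ico] at hf
      have hle : (f + 1) * w ≤ top * w := by
        have : f + 1 ≤ top := hf.2
        nlinarith
      split <;> nlinarith
    by_cases hc : top * w + (if PySem.Int.mod top 2 = 0 then col else w - 1 - col) < n
    · rw [if_pos hc, hfull, Finset.card_insert_of_notMem (by simp), if_pos ⟨hst, hc⟩]
      simp only [Int.card_Ico]
      omega
    · rw [if_neg hc, if_neg (by tauto), hfull]
      simp only [Int.card_Ico]
      omega
  · have he : Finset.Ico start (top+1) = ∅ := Finset.Ico_eq_empty (by omega)
    rw [he]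
    simp only [Finset.filter_empty, Finset.card_empty]
    rw [if_neg (by tauto)]
    omega

theorem pv_glue (n w num : Int) (hw : 1 ≤ w) : solution n w num = solution_alt n w num := by
  have hw0 : (0:Int) < w := hw
  have hA := pv_foldl_if_countP (fun i =>
      (if PySem.Int.mod (PySem.Int.floordiv i w) 2 = 0 then PySem.Int.mod i w
        else w - 1 - PySem.Int.mod i w) =
        (if PySem.Int.mod (PySem.Int.floordiv (num-1) w) 2 = 0 then PySem.Int.mod (num-1) w
          else w - 1 - PySem.Int.mod (num-1) w) ∧
      PySem.Int.floordiv (num-1) w ≤ PySem.Int.floordiv i w)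
    (PySem.List.pyRange 0 n 1)
  have eA : solution n w num = _ := hA
  rw [eA, pv_countP_card]
  have hcard := pv_main n w num hw
  simp only at hcard
  rw [show ((((Finset.Ico (0:Int) n).filter _).card : Int)) = _ from congrArg _ hcard]
  set col := (if PySem.Int.mod (PySem.Int.floordiv (num-1) w) 2 = 0 then PySem.Int.mod (num-1) w
      else w - 1 - PySem.Int.mod (num-1) w) with hcoldef
  have hm0 : 0 ≤ PySem.Int.mod (num-1) w := PySem.Int.mod_nonneg _ hw0
  have hmw : PySem.Int.mod (num-1) w < w := PySem.Int.mod_lt _ hw0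
  have hcol0 : 0 ≤ col := by rw [hcoldef]; split <;> omega
  have hcolw : col < w := by rw [hcoldef]; split <;> omega
  have htw : PySem.Int.floordiv (n-1) w * w ≤ n - 1 := by
    have := PySem.Int.floordiv_mul_add_mod (n-1) w
    have := PySem.Int.mod_nonneg (n-1) hw0
    omega
  have hclosed := pv_floors_closed n w col (max (PySem.Int.floordiv (num-1) w) 0)
    (PySem.Int.floordiv (n-1) w) hw hcol0 hcolw htw
  rw [hclosed]
  rfl

-- ===== VERDICT (by name: the statement is the Claim_ definition above) =====
theorem solution_spec : Claim_equal_solution := by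
  intro n w num _ hpre
  show solution n w num = solution_alt n w num
  exact pv_glue n w num hpre
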